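-- pv_equiv track=rewrite | github.com/chennyso/agent | src/fsdp_agent/agent_loop.py | _last_oom_info
-- ===== SOURCE A (Python) =====
-- from typing import Dict, List, Optional
--
-- def _last_oom_info(history: List[Dict]) -> Optional[Dict]:
--     for m in reversed(history):
--         if m.get("oom"):
--             return {
--                 "trial_id": m.get("trial_id"),
--                 "config_name": m.get("config_name"),
--                 "oom_stage": m.get("oom_stage"),
--                 "error_msg": m.get("error_msg"),
--             }
--     return None
-- ===== SOURCE B (Python) =====
-- def _last_oom_info(history):
--     last = None
--     for m in history:
--         if m.get("oom"):
--             last = m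
--     if last is None:
--         return None
--     return {
--         "trial_id": last.get("trial_id"),
--         "config_name": last.get("config_name"),
--         "oom_stage": last.get("oom_stage"),
--         "error_msg": last.get("error_msg"),
--     }
-- ===== Notes on version B (the rewrite author's own statement) =====
-- stated objective: alternative
-- what changed: Replaces the reverse scan with early return by a single forward pass keeping the last entry whose 'oom' value is truthy, building the result dict once after the loop.
import Mathlib
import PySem

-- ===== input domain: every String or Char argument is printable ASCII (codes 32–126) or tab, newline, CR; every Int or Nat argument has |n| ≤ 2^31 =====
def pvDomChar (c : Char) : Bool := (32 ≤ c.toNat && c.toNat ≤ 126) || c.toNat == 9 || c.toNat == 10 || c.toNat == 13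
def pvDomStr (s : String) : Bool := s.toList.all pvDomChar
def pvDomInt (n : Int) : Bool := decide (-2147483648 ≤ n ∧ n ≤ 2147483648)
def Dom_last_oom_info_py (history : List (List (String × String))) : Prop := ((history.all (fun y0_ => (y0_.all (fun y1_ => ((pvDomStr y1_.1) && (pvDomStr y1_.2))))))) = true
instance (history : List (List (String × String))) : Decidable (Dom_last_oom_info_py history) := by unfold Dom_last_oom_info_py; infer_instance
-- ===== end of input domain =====

-- B replaces A's reverse scan (early return on first OOM hit) by a forward pass that keeps
-- overwriting the last OOM entry and builds the result dict once after the loop (alternative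
-- decomposition, same cost).  Equivalence is about the return value; neither mutates its argument.

-- m.get(k): first-match lookup in the association list (Python dict convention)
def pvGetOom (m : List (String × String)) (k : String) : Option String :=
  (m.find? (fun p => p.1 == k)).map (·.2)

-- value of m.get(k) when present (Pre_ guarantees presence on the entry actually used)
def pvGetOomS (m : List (String × String)) (k : String) : String :=
  (pvGetOom m k).getD ""

-- truthiness of m.get("oom"): present and a non-empty string
def pvOomTruthy (m : List (String × String)) : Bool :=
  match pvGetOom m "oom" with
  | some s => s ≠ ""
  | none => false

-- the four-key result dict Python builds from entry m
def pvOomMk (m : List (String × String)) : List (String × String) :=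
  [("trial_id", pvGetOomS m "trial_id"),
   ("config_name", pvGetOomS m "config_name"),
   ("oom_stage", pvGetOomS m "oom_stage"),
   ("error_msg", pvGetOomS m "error_msg")]

-- ===== PORT A =====
-- the 'for m in reversed(history)' loop with its early return
def lastOomGoA : List (List (String × String)) → Option (List (String × String))
  | [] => none
  | m :: rest => if pvOomTruthy m then some (pvOomMk m) else lastOomGoA rest

def last_oom_info_py (history : List (List (String × String))) : Option (List (String × String)) :=
  lastOomGoA history.reverse

-- ===== PORT B =====
def last_oom_info_py_alt (history : List (List (String × String))) : Option (List (String × String)) :=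
  let last := history.foldl (fun acc m => if pvOomTruthy m then some m else acc)
                (none : Option (List (String × String)))
  match last with
  | none => none
  | some m => some (pvOomMk m)

-- ===== PRECONDITION & SPEC =====
-- Pre_ excludes histories containing an entry with a truthy "oom" value that lacks one of the
-- four reported keys: there Python A returns a dict whose missing entries are None, which is not
-- a value of the declared String value type (type-convention exclusion, not a behaviour choice).
def Pre_last_oom_info_py (history : List (List (String × String))) : Prop :=
  (history.all (fun m => !pvOomTruthy m ||
     (m.any (fun p => p.1 == "trial_id") && m.any (fun p => p.1 == "config_name") &&
      m.any (fun p => p.1 == "oom_stage") && m.any (fun p => p.1 == "error_msg")))) = true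
instance (history : List (List (String × String))) : Decidable (Pre_last_oom_info_py history) := by
  unfold Pre_last_oom_info_py; infer_instance

def pvWitness_last_oom_info_py : (List (List (String × String))) :=
  [[("oom", "1"), ("trial_id", "t3"), ("config_name", "cfg"), ("oom_stage", "fwd"), ("error_msg", "CUDA OOM")],
   [("oom", "")]]

def Spec_last_oom_info_py (history : List (List (String × String))) (out : Option (List (String × String))) : Prop := out = last_oom_info_py_alt history
instance (history : List (List (String × String))) (out : Option (List (String × String))) : Decidable (Spec_last_oom_info_py history out) := by unfold Spec_last_oom_info_py; infer_instance

-- ===== CLAIM (what is proved, stated in full; the proofs are below) =====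
def Claim_equal_last_oom_info_py : Prop := ∀ (history : List (List (String × String))), Dom_last_oom_info_py history → Pre_last_oom_info_py history → Spec_last_oom_info_py history (last_oom_info_py history)

-- ===== LEMMAS AND PROOFS =====

-- A's reverse loop is "map pvOomMk over the first truthy element"
theorem lastOomGoA_eq_find (l : List (List (String × String))) :
    lastOomGoA l = (l.find? pvOomTruthy).map pvOomMk := by
  induction l with
  | nil => rfl
  | cons m rest ih =>
      by_cases h : pvOomTruthy m = true
      · simp [lastOomGoA, List.find?, h]
      · simp [lastOomGoA, List.find?, h, ih]

-- B's forward fold keeps the first truthy element of the REVERSED list (the last forward one)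
theorem foldl_last_truthy (l : List (List (String × String)))
    (acc : Option (List (String × String))) :
    l.foldl (fun acc m => if pvOomTruthy m then some m else acc) acc
      = match l.reverse.find? pvOomTruthy with
        | some m => some m
        | none => acc := by
  induction l generalizing acc with
  | nil => rfl
  | cons m rest ih =>
      simp only [List.foldl_cons, List.reverse_cons, List.find?_append, ih]
      cases h : rest.reverse.find? pvOomTruthy with
      | some v => simp
      | none =>
          by_cases hm : pvOomTruthy m = true <;> simp [List.find?, hm]

-- ===== VERDICT (by name: the statement is the Claim_ definition above) =====
theorem last_oom_info_py_spec : Claim_equal_last_oom_info_py := by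
  intro history _ _
  unfold Spec_last_oom_info_py last_oom_info_py last_oom_info_py_alt
  rw [lastOomGoA_eq_find, foldl_last_truthy]
  cases history.reverse.find? pvOomTruthy <;> simp
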